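-- pv_equiv track=rewrite | github.com/ColesonJ347/Macc-exit-survey-ranking | src/rank_order.py | get_group_cols
-- ===== SOURCE A (Python) =====
-- def get_group_cols(columns, keyword_base):
--     """Return dict of group columns for Most/Neutral/Least for a section."""
--     def find_col(suffix):
--         matches = [c for c in columns if keyword_base in c and suffix in c]
--         return matches[0] if matches else None
--
--     return {
--         "most": find_col("Groups - Most Beneficial"),
--         "neutral": find_col("Groups - Neutral"),
--         "least": find_col("Groups - Least Beneficial"),
--     }
-- ===== SOURCE B (Python) =====
-- def get_group_cols(columns, keyword_base):
--     """Return dict of group columns for Most/Neutral/Least for a section."""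
--     suffixes = {
--         "most": "Groups - Most Beneficial",
--         "neutral": "Groups - Neutral",
--         "least": "Groups - Least Beneficial",
--     }
--     result = {"most": None, "neutral": None, "least": None}
--     for c in columns:
--         if keyword_base in c:
--             for key, suf in suffixes.items():
--                 if result[key] is None and suf in c:
--                     result[key] = c
--     return result
-- ===== Notes on version B (the rewrite author's own statement) =====
-- stated objective: simpler
-- what changed: Replaces three independent full scans of columns (one per suffix via the find_col helper building a filtered list each time) by a single pass that fills each still-empty slot on its first match.
import Mathlib
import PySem

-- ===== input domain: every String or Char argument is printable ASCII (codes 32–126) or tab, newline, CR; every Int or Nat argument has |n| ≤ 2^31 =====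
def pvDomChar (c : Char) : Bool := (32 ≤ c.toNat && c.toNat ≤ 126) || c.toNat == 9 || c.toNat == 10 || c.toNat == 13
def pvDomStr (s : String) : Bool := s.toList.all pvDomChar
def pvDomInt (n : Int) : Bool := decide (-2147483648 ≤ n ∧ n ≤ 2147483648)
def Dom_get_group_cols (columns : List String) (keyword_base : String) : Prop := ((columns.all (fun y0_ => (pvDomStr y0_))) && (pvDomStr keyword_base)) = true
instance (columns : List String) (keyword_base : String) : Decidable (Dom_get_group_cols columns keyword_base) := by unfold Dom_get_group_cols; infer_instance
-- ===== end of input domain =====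

-- B replaces A's three full scans (one per suffix) by a single pass filling each still-empty slot; return value only.

-- ===== PORT A =====
-- find_col: list comprehension filtering columns, then ms[0] if ms else None
def findCol (columns : List String) (keyword_base : String) (suffix : String) : Option String :=
  let ms := columns.filter (fun c => PySem.Str.isIn keyword_base c && PySem.Str.isIn suffix c)
  ms.head?

def get_group_cols (columns : List String) (keyword_base : String) : List (String × Option String) :=
  [("most", findCol columns keyword_base "Groups - Most Beneficial"),
   ("neutral", findCol columns keyword_base "Groups - Neutral"),
   ("least", findCol columns keyword_base "Groups - Least Beneficial")]

-- ===== PORT B =====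
-- one pass: state is the three slots (most, neutral, least), filled only while still None
def fillSlots (keyword_base : String) (st : Option String × Option String × Option String)
    (c : String) : Option String × Option String × Option String :=
  if PySem.Str.isIn keyword_base c then
    (if st.1.isNone && PySem.Str.isIn "Groups - Most Beneficial" c then some c else st.1,
     if st.2.1.isNone && PySem.Str.isIn "Groups - Neutral" c then some c else st.2.1,
     if st.2.2.isNone && PySem.Str.isIn "Groups - Least Beneficial" c then some c else st.2.2)
  else st

def get_group_cols_alt (columns : List String) (keyword_base : String) : List (String × Option String) :=
  let st := columns.foldl (fillSlots keyword_base) (none, none, none)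
  [("most", st.1), ("neutral", st.2.1), ("least", st.2.2)]

-- ===== PRECONDITION & SPEC =====
def Spec_get_group_cols (columns : List String) (keyword_base : String) (out : List (String × Option String)) : Prop := out = get_group_cols_alt columns keyword_base
instance (columns : List String) (keyword_base : String) (out : List (String × Option String)) : Decidable (Spec_get_group_cols columns keyword_base out) := by unfold Spec_get_group_cols; infer_instance

-- ===== CLAIM (what is proved, stated in full; the proofs are below) =====
def Claim_equal_get_group_cols : Prop := ∀ (columns : List String) (keyword_base : String), Dom_get_group_cols columns keyword_base → Spec_get_group_cols columns keyword_base (get_group_cols columns keyword_base)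

-- ===== LEMMAS AND PROOFS =====

-- a single slot of B's fold, in isolation
def fill1 (keyword_base suffix : String) (o : Option String) (c : String) : Option String :=
  if PySem.Str.isIn keyword_base c then
    (if o.isNone && PySem.Str.isIn suffix c then some c else o)
  else o

lemma foldl_fillSlots_proj (keyword_base : String) (columns : List String)
    (st : Option String × Option String × Option String) :
    columns.foldl (fillSlots keyword_base) st =
      (columns.foldl (fill1 keyword_base "Groups - Most Beneficial") st.1,
       columns.foldl (fill1 keyword_base "Groups - Neutral") st.2.1,
       columns.foldl (fill1 keyword_base "Groups - Least Beneficial") st.2.2) := by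
  induction columns generalizing st with
  | nil => rfl
  | cons c cs ih =>
    simp only [List.foldl_cons, ih]
    unfold fillSlots fill1
    by_cases h : PySem.Chars.isIn keyword_base.toList c.toList = true <;> simp [PySem.Str.isIn, h]

lemma foldl_fill1_some (keyword_base suffix x : String) (columns : List String) :
    columns.foldl (fill1 keyword_base suffix) (some x) = some x := by
  induction columns with
  | nil => rfl
  | cons c cs ih => simpa [fill1] using ih

lemma foldl_fill1_none (keyword_base suffix : String) (columns : List String) :
    columns.foldl (fill1 keyword_base suffix) none =
      (columns.filter (fun c => PySem.Str.isIn keyword_base c && PySem.Str.isIn suffix c)).head? := by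
  induction columns with
  | nil => rfl
  | cons c cs ih =>
    by_cases hk : PySem.Chars.isIn keyword_base.toList c.toList = true <;>
      by_cases hs : PySem.Chars.isIn suffix.toList c.toList = true <;>
        simp [fill1, PySem.Str.isIn, hk, hs, ih, foldl_fill1_some]

-- ===== VERDICT (by name: the statement is the Claim_ definition above) =====
theorem get_group_cols_spec : Claim_equal_get_group_cols := by
  intro columns keyword_base _
  show _ = _
  simp [get_group_cols, get_group_cols_alt, findCol, foldl_fillSlots_proj, foldl_fill1_none]
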